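-- pv_equiv track=rewrite | github.com/christophhollweck/iga_framework | iga_framework/element_6dof_RM_shell.py | find_fixed_DOFs_on_edges
-- ===== SOURCE A (Python) =====
-- def find_fixed_DOFs_on_edges(cps_on_edges, fixed_dirs):
--     # u, v, w, rx, ry, rz
--     fixed_DOFs = {
--         'x': [6 * cp for cp in cps_on_edges],
--         'y': [6 * cp + 1 for cp in cps_on_edges],
--         'z': [6 * cp + 2 for cp in cps_on_edges],
--         'rx': [6 * cp + 3 for cp in cps_on_edges],
--         'ry': [6 * cp + 4 for cp in cps_on_edges],
--         'rz': [6 * cp + 5 for cp in cps_on_edges]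
--     }
--
--     total_fixed_DOFs = set()
--     for fixed_dir in fixed_dirs:
--         total_fixed_DOFs.update(fixed_DOFs[fixed_dir])
--
--     return total_fixed_DOFs
-- ===== SOURCE B (Python) =====
-- def find_fixed_DOFs_on_edges(cps_on_edges, fixed_dirs):
--     # De-duplicate both inputs first (order-preserving), then emit the
--     # cross product directly: with distinct offsets in 0..5 and distinct
--     # control points, every 6*cp + o below is produced exactly once.
--     names = ('x', 'y', 'z', 'rx', 'ry', 'rz')
--     offs = list(dict.fromkeys(names.index(d) for d in fixed_dirs))
--     cps = list(dict.fromkeys(cps_on_edges))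
--     return {6 * cp + o for o in offs for cp in cps}
-- ===== Notes on version B (the rewrite author's own statement) =====
-- stated objective: alternative
-- what changed: B drops A's dict of six precomputed DOF lists and its set-update loop: it deduplicates the direction names (via tuple .index) and the control points once, then emits the duplicate-free cross product 6*cp+o directly.
import Mathlib
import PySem

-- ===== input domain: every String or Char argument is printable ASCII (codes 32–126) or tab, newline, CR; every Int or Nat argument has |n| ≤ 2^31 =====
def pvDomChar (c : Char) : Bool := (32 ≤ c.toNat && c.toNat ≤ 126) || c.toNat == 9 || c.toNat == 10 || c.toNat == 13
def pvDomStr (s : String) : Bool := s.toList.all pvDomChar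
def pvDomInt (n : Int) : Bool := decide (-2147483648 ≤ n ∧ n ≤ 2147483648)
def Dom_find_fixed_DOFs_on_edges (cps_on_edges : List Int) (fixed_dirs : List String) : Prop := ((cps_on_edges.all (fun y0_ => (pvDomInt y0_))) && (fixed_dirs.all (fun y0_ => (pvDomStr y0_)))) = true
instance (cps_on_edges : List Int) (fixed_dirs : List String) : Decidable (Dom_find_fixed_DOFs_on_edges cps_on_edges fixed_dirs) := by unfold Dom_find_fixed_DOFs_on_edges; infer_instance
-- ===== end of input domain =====

-- B deduplicates directions and control points once and emits the duplicate-free cross product,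
-- instead of A's dict of six precomputed lists consumed by a set-update loop (alternative decomposition).
-- ===== PORT A =====
def find_fixed_DOFs_on_edges (cps_on_edges : List Int) (fixed_dirs : List String) : List Int :=
  let fixed_DOFs : PySem.Dict String (List Int) :=
    (((((PySem.Dict.empty.insert "x" (cps_on_edges.map (fun cp => 6 * cp))).insert
        "y" (cps_on_edges.map (fun cp => 6 * cp + 1))).insert
        "z" (cps_on_edges.map (fun cp => 6 * cp + 2))).insert
        "rx" (cps_on_edges.map (fun cp => 6 * cp + 3))).insert
        "ry" (cps_on_edges.map (fun cp => 6 * cp + 4))).insert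
        "rz" (cps_on_edges.map (fun cp => 6 * cp + 5))
  -- fixed_DOFs[fixed_dir] : KeyError (none) only outside Pre_; total form via getD
  fixed_dirs.foldl
    (fun total_fixed_DOFs fixed_dir =>
      PySem.Set.update total_fixed_DOFs ((fixed_DOFs.get? fixed_dir).getD []))
    PySem.Set.empty

-- ===== PORT B =====
def find_fixed_DOFs_on_edges_alt (cps_on_edges : List Int) (fixed_dirs : List String) : List Int :=
  let names : List String := ["x", "y", "z", "rx", "ry", "rz"]
  -- names.index(d) : ValueError (none) only outside Pre_; total form via getD
  let offs : List Int :=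
    PySem.List.dedup (fixed_dirs.map (fun d => (((PySem.List.index? names d).getD 0 : Nat) : Int)))
  let cps : List Int := PySem.List.dedup cps_on_edges
  PySem.Set.ofList (offs.flatMap (fun o => cps.map (fun cp => 6 * cp + o)))

-- ===== PRECONDITION & SPEC =====
-- Pre_ excludes exactly the inputs on which A raises KeyError (a direction name other than the six keys).
def Pre_find_fixed_DOFs_on_edges (cps_on_edges : List Int) (fixed_dirs : List String) : Prop :=
  ∀ d ∈ fixed_dirs, d = "x" ∨ d = "y" ∨ d = "z" ∨ d = "rx" ∨ d = "ry" ∨ d = "rz"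
instance (cps_on_edges : List Int) (fixed_dirs : List String) : Decidable (Pre_find_fixed_DOFs_on_edges cps_on_edges fixed_dirs) := by unfold Pre_find_fixed_DOFs_on_edges; infer_instance
def pvWitness_find_fixed_DOFs_on_edges : List Int × List String := ([0, 2, 5], ["x", "rz", "y"])
def Spec_find_fixed_DOFs_on_edges (cps_on_edges : List Int) (fixed_dirs : List String) (out : List Int) : Prop := out = find_fixed_DOFs_on_edges_alt cps_on_edges fixed_dirs
instance (cps_on_edges : List Int) (fixed_dirs : List String) (out : List Int) : Decidable (Spec_find_fixed_DOFs_on_edges cps_on_edges fixed_dirs out) := by unfold Spec_find_fixed_DOFs_on_edges; infer_instance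

-- ===== CLAIM (what is proved, stated in full; the proofs are below) =====
def Claim_equal_find_fixed_DOFs_on_edges : Prop := ∀ (cps_on_edges : List Int) (fixed_dirs : List String), Dom_find_fixed_DOFs_on_edges cps_on_edges fixed_dirs → Pre_find_fixed_DOFs_on_edges cps_on_edges fixed_dirs → Spec_find_fixed_DOFs_on_edges cps_on_edges fixed_dirs (find_fixed_DOFs_on_edges cps_on_edges fixed_dirs)

-- ===== LEMMAS AND PROOFS =====

-- updating with a list already contained in the set is a no-op
theorem pv_update_of_subset (s : PySem.Set Int) (l : List Int) (h : ∀ x ∈ l, x ∈ s) :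
    PySem.Set.update s l = s := by
  induction l generalizing s with
  | nil => rfl
  | cons x t ih =>
    rw [PySem.Set.update_cons]
    have hadd : PySem.Set.add s x = s := by
      simp [PySem.Set.add, PySem.Set.contains, h x (by simp)]
    rw [hadd]
    exact ih s (fun y hy => h y (by simp [hy]))

-- a fold of set-updates is one update with the concatenation
theorem pv_foldl_update {β : Type} (l : List β) (h : β → List Int) (s : PySem.Set Int) :
    l.foldl (fun s x => PySem.Set.update s (h x)) s = PySem.Set.update s (l.flatMap h) := by
  induction l generalizing s with
  | nil => rfl
  | cons x t ih => simp [List.flatMap_cons, PySem.Set.update_append, ih]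

-- update with a singleton is add
theorem pv_update_single (s : PySem.Set Int) (x : Int) :
    PySem.Set.update s [x] = PySem.Set.add s x := rfl

-- duplicates in the updating list are irrelevant
theorem pv_update_dedup (s : PySem.Set Int) (l : List Int) :
    PySem.Set.update s (PySem.List.dedup l) = PySem.Set.update s l := by
  induction l using List.reverseRecOn with
  | nil => rfl
  | append_singleton t x ih =>
    rw [PySem.Set.update_append, pv_update_single, PySem.List.dedup_eq_ofList,
      PySem.Set.ofList_append_singleton]
    by_cases hx : x ∈ PySem.Set.ofList t
    · have h1 : PySem.Set.add (PySem.Set.ofList t) x = PySem.Set.ofList t := by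
        simp [PySem.Set.add, PySem.Set.contains, hx]
      have h2 : PySem.Set.add (PySem.Set.update s t) x = PySem.Set.update s t := by
        simp [PySem.Set.add, PySem.Set.contains, PySem.Set.mem_update,
          (PySem.Set.mem_ofList t x).mp hx]
      rw [h1, ← PySem.List.dedup_eq_ofList, ih, h2]
    · have h1 : PySem.Set.add (PySem.Set.ofList t) x = PySem.Set.ofList t ++ [x] := by
        simp [PySem.Set.add, PySem.Set.contains, hx]
      rw [h1, PySem.Set.update_append, pv_update_single, ← PySem.List.dedup_eq_ofList, ih]

-- dedup commutes with an injective map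
theorem pv_dedup_map_inj (f : Int → Int) (hf : Function.Injective f) (l : List Int) :
    PySem.List.dedup (l.map f) = (PySem.List.dedup l).map f := by
  induction l using List.reverseRecOn with
  | nil => rfl
  | append_singleton t x ih =>
    simp only [List.map_append, List.map_cons, List.map_nil, PySem.List.dedup_eq_ofList,
      PySem.Set.ofList_append_singleton] at *
    by_cases hx : x ∈ t
    · have h1 : PySem.Set.add (PySem.Set.ofList t) x = PySem.Set.ofList t := by
        simp [PySem.Set.add, PySem.Set.contains, PySem.Set.mem_ofList, hx]
      have h2 : PySem.Set.add (PySem.Set.ofList (t.map f)) (f x) = PySem.Set.ofList (t.map f) := by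
        simp only [PySem.Set.add, PySem.Set.contains]
        have : f x ∈ PySem.Set.ofList (t.map f) := by
          rw [PySem.Set.mem_ofList]; exact List.mem_map_of_mem hx
        simp [this]
      rw [h1, h2, ih]
    · have h1 : PySem.Set.add (PySem.Set.ofList t) x = PySem.Set.ofList t ++ [x] := by
        simp [PySem.Set.add, PySem.Set.contains, hx]
      have h2 : PySem.Set.add (PySem.Set.ofList (t.map f)) (f x)
          = PySem.Set.ofList (t.map f) ++ [f x] := by
        have hnm : f x ∉ PySem.Set.ofList (t.map f) := by
          rw [PySem.Set.mem_ofList]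
          intro hmem
          rcases List.mem_map.mp hmem with ⟨y, hy, hyx⟩
          exact hx (hf hyx ▸ hy)
        simp [PySem.Set.add, PySem.Set.contains, hnm]
      rw [h1, h2, ih, List.map_append, List.map_cons, List.map_nil]

-- duplicate outer blocks are irrelevant for the resulting set
theorem pv_ofList_flatMap_dedup (os : List Int) (h : Int → List Int) :
    PySem.Set.ofList ((PySem.List.dedup os).flatMap h) = PySem.Set.ofList (os.flatMap h) := by
  induction os using List.reverseRecOn with
  | nil => rfl
  | append_singleton t o ih =>
    by_cases ho : o ∈ PySem.Set.ofList t
    · have hdd : PySem.List.dedup (t ++ [o]) = PySem.List.dedup t := by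
        rw [PySem.List.dedup_eq_ofList, PySem.Set.ofList_append_singleton,
          ← PySem.List.dedup_eq_ofList]
        simp [PySem.Set.add, PySem.Set.contains, ho, PySem.List.dedup_eq_ofList]
      rw [hdd, ih, List.flatMap_append, PySem.Set.ofList_append, List.flatMap_singleton]
      refine (pv_update_of_subset _ _ ?_).symm
      intro x hx
      rw [PySem.Set.mem_ofList]
      exact List.mem_flatMap.mpr ⟨o, (PySem.Set.mem_ofList t o).mp ho, hx⟩
    · have hdd : PySem.List.dedup (t ++ [o]) = PySem.List.dedup t ++ [o] := by
        rw [PySem.List.dedup_eq_ofList, PySem.Set.ofList_append_singleton,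
          ← PySem.List.dedup_eq_ofList]
        simp [PySem.Set.add, PySem.Set.contains, ho, PySem.List.dedup_eq_ofList]
      rw [hdd, List.flatMap_append, List.flatMap_append, PySem.Set.ofList_append,
        PySem.Set.ofList_append, ih]

-- inner dedup: deduplicating the mapped-over list does not change the resulting set
theorem pv_flatMap_inner_dedup {β : Type} (os : List β) (fo : β → Int) (cps : List Int)
    (s : PySem.Set Int) :
    PySem.Set.update s (os.flatMap (fun d => (PySem.List.dedup cps).map (fun cp => 6 * cp + fo d)))
      = PySem.Set.update s (os.flatMap (fun d => cps.map (fun cp => 6 * cp + fo d))) := by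
  induction os generalizing s with
  | nil => rfl
  | cons o t ih =>
    rw [List.flatMap_cons, List.flatMap_cons, PySem.Set.update_append, PySem.Set.update_append, ih]
    congr 1
    rw [← pv_dedup_map_inj (fun cp => 6 * cp + fo o) (fun a b hab => by dsimp at hab; omega),
      pv_update_dedup]

-- ===== VERDICT (by name: the statement is the Claim_ definition above) =====
theorem find_fixed_DOFs_on_edges_spec : Claim_equal_find_fixed_DOFs_on_edges := by
  intro cps dirs _ hpre
  unfold Spec_find_fixed_DOFs_on_edges find_fixed_DOFs_on_edges find_fixed_DOFs_on_edges_alt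
  simp only []
  rw [pv_foldl_update, PySem.Set.update_empty, pv_ofList_flatMap_dedup, List.flatMap_map]
  conv_rhs => rw [← PySem.Set.update_empty, pv_flatMap_inner_dedup, PySem.Set.update_empty]
  congr 1
  apply List.flatMap_congr
  intro d hd
  have hx : PySem.List.index? ["x", "y", "z", "rx", "ry", "rz"] "x" = some 0 := by decide
  have hy : PySem.List.index? ["x", "y", "z", "rx", "ry", "rz"] "y" = some 1 := by decide
  have hz : PySem.List.index? ["x", "y", "z", "rx", "ry", "rz"] "z" = some 2 := by decide
  have hrx : PySem.List.index? ["x", "y", "z", "rx", "ry", "rz"] "rx" = some 3 := by decide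
  have hry : PySem.List.index? ["x", "y", "z", "rx", "ry", "rz"] "ry" = some 4 := by decide
  have hrz : PySem.List.index? ["x", "y", "z", "rx", "ry", "rz"] "rz" = some 5 := by decide
  rcases hpre d hd with rfl | rfl | rfl | rfl | rfl | rfl <;>
    simp only [hx, hy, hz, hrx, hry, hrz, Option.getD_some] <;>
    simp [PySem.Dict.empty, PySem.Dict.insert, PySem.Dict.get?, List.find?]
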